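-- pv_equiv track=rewrite | github.com/meenalsawant017/LeetCode_Problems | Codility/remove C and D.py | transform
-- ===== SOURCE A (Python) =====
-- def transform(s): # stack O(N)
--     stack = []
--     for c in s:
--         if stack and stack[-1] + c in ("AB", "BA", "CD", "DC"):
--             stack.pop()
--         else:
--             stack += c
--     return "".join(stack)
-- ===== SOURCE B (Python) =====
-- def transform(s):
--     # fixpoint of single left-to-right passes that delete adjacent complementary pairs
--     pairs = ("AB", "BA", "CD", "DC")
--     changed = True
--     while changed:
--         changed = False
--         out = []
--         i = 0
--         n = len(s)
--         while i < n:
--             if i + 1 < n and s[i] + s[i + 1] in pairs: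
--                 i += 2
--                 changed = True
--             else:
--                 out.append(s[i])
--                 i += 1
--         s = "".join(out)
--     return s
-- ===== Notes on version B (the rewrite author's own statement) =====
-- stated objective: alternative
-- what changed: Replaces the stack with repeated stackless left-to-right passes that delete adjacent complementary pairs until a fixpoint is reached (correct by confluence of the cancellation rewrite).
import Mathlib
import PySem

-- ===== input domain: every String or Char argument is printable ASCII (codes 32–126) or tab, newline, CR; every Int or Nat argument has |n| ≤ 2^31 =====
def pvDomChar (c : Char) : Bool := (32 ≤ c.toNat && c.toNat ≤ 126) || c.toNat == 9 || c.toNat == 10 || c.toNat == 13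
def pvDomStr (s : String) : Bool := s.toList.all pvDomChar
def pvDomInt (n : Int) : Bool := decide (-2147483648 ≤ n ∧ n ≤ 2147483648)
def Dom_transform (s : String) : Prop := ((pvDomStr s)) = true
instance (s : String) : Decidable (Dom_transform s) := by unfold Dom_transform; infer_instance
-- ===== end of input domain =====

-- B replaces the stack with repeated stackless left-to-right passes deleting adjacent
-- complementary pairs until a fixpoint; equal by confluence of the cancellation rewrite.

-- ===== PORT A =====
-- one step of A's loop body: `if stack and stack[-1] + c in ("AB","BA","CD","DC"): pop else append`
def stepA (stack : List Char) (c : Char) : List Char :=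
  match PySem.List.pyGet? stack (-1) with   -- stack[-1]; none exactly when `stack` is falsy
  | some e =>
      if (["AB", "BA", "CD", "DC"] : List String).contains (String.ofList [e, c]) then
        stack.dropLast              -- stack.pop()
      else stack ++ [c]             -- stack += c
  | none => stack ++ [c]

def transform (s : String) : String :=
  String.ofList (s.toList.foldl stepA [])   -- "".join(stack)

-- ===== PORT B =====
def pairB (a b : Char) : Bool :=
  (a == 'A' && b == 'B') || (a == 'B' && b == 'A') ||
  (a == 'C' && b == 'D') || (a == 'D' && b == 'C')

-- one inner `while i < n` pass of Source B: (resulting list, changed flag)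
def passB : List Char → List Char × Bool
  | [] => ([], false)
  | [c] => ([c], false)
  | c :: d :: t =>
      if pairB c d then ((passB t).1, true)
      else
        let r := passB (d :: t)
        (c :: r.1, r.2)

theorem passB_len (l : List Char) :
    (passB l).1.length + (if (passB l).2 then 2 else 0) ≤ l.length := by
  induction l using passB.induct with
  | case1 => simp [passB]
  | case2 c => simp [passB]
  | case3 c d t h ih =>
      simp only [passB, if_pos h, List.length_cons, if_true]
      split at ih <;> omega
  | case4 c d t h ih =>
      simp only [passB, if_neg h, List.length_cons] at ih ⊢
      split at ih <;> simp_all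

-- the outer `while changed` loop of Source B
def loopB (l : List Char) : List Char :=
  if (passB l).2 then loopB (passB l).1 else (passB l).1
termination_by l.length
decreasing_by
  have := passB_len l
  rw [if_pos ‹(passB l).2 = true›] at this
  omega

def transform_alt (s : String) : String := String.ofList (loopB s.toList)

-- ===== PRECONDITION & SPEC =====
def Spec_transform (s : String) (out : String) : Prop := out = transform_alt s
instance (s : String) (out : String) : Decidable (Spec_transform s out) := by unfold Spec_transform; infer_instance

-- ===== CLAIM (what is proved, stated in full; the proofs are below) =====
def Claim_equal_transform : Prop := ∀ (s : String), Dom_transform s → Spec_transform s (transform s)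

-- ===== LEMMAS AND PROOFS =====

-- A's step on the reversed stack (cons-based view used only in the proofs)
def rstep (r : List Char) (c : Char) : List Char :=
  match r with
  | [] => [c]
  | e :: t => if pairB e c then t else c :: e :: t

theorem strBeq_pair (e c a b : Char) :
    (String.ofList [e, c] == String.ofList [a, b]) = (e == a && c == b) := by
  by_cases h1 : e = a
  · subst h1
    by_cases h2 : c = b
    · subst h2; simp
    · have hne : String.ofList [e, c] ≠ String.ofList [e, b] := by
        intro h; apply h2
        have := congrArg String.toList h
        simp at this; exact this
      rw [beq_eq_false_iff_ne.mpr hne, beq_eq_false_iff_ne.mpr h2, beq_self_eq_true,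
        Bool.true_and]
  · have hne : String.ofList [e, c] ≠ String.ofList [a, b] := by
      intro h; apply h1
      have := congrArg String.toList h
      simp at this; exact this.1
    rw [beq_eq_false_iff_ne.mpr hne, beq_eq_false_iff_ne.mpr h1, Bool.false_and]

theorem contains_eq_pairB (e c : Char) :
    (["AB", "BA", "CD", "DC"] : List String).contains (String.ofList [e, c]) = pairB e c := by
  simp only [show ("AB" : String) = String.ofList ['A','B'] from rfl,
    show ("BA" : String) = String.ofList ['B','A'] from rfl,
    show ("CD" : String) = String.ofList ['C','D'] from rfl,
    show ("DC" : String) = String.ofList ['D','C'] from rfl,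
    List.contains_cons, List.contains_nil, strBeq_pair, pairB]
  cases e == 'A' <;> cases e == 'B' <;> cases e == 'C' <;> cases e == 'D' <;>
    cases c == 'A' <;> cases c == 'B' <;> cases c == 'C' <;> cases c == 'D' <;> rfl

theorem stepA_eq_rstep (st : List Char) (c : Char) :
    stepA st c = (rstep st.reverse c).reverse := by
  induction st using List.reverseRecOn with
  | nil => simp [stepA, rstep, PySem.List.pyGet?_neg_one]
  | append_singleton ys e _ =>
      simp only [stepA, PySem.List.pyGet?_neg_one, List.getLast?_concat, contains_eq_pairB,
        List.reverse_append, List.reverse_cons, List.reverse_nil, List.nil_append,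
        List.singleton_append, rstep]
      split <;> simp

theorem foldl_stepA_eq (st : List Char) (l : List Char) :
    l.foldl stepA st = (l.foldl rstep st.reverse).reverse := by
  induction l generalizing st with
  | nil => simp
  | cons c t ih =>
      simp only [List.foldl_cons, stepA_eq_rstep, ih, List.reverse_reverse]

-- the reversed stack never has a head that its next element cancels
def RedR (r : List Char) : Prop := List.IsChain (fun a b => pairB b a = false) r

theorem rstep_red {r : List Char} (h : RedR r) (c : Char) : RedR (rstep r c) := by
  cases r with
  | nil => simp [rstep, RedR]
  | cons e t =>
      by_cases hp : pairB e c
      · simpa [rstep, hp, RedR] using h.tail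
      · have : List.IsChain (fun a b => pairB b a = false) (c :: e :: t) :=
          List.isChain_cons_cons.mpr ⟨by simpa using hp, h⟩
        simpa [rstep, hp, RedR] using this

theorem pairB_uniq {e c d : Char} (h1 : pairB e c = true) (h2 : pairB c d = true) : e = d := by
  simp only [pairB, Bool.or_eq_true, Bool.and_eq_true, beq_iff_eq] at h1 h2
  rcases h1 with ((⟨he, hc⟩ | ⟨he, hc⟩) | ⟨he, hc⟩) | ⟨he, hc⟩ <;> subst he <;> subst hc <;>
    rcases h2 with ((⟨hc, hd⟩ | ⟨hc, hd⟩) | ⟨hc, hd⟩) | ⟨hc, hd⟩ <;> simp_all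

-- cancelling two complementary letters on a reduced reversed stack is a no-op
theorem rstep_cancel {r : List Char} (h : RedR r) {c d : Char} (hp : pairB c d = true) :
    rstep (rstep r c) d = r := by
  cases r with
  | nil => simp [rstep, hp]
  | cons e t =>
      by_cases he : pairB e c
      · have hed : e = d := pairB_uniq he hp
        subst hed
        cases t with
        | nil => simp [rstep, he]
        | cons f t' =>
            have hfe : pairB f e = false := (List.isChain_cons_cons.mp h).1
            simp [rstep, he, hfe]
      · simp [rstep, he, hp]

-- one pass of B does not change A's normal form
theorem foldl_rstep_passB {r : List Char} (h : RedR r) (l : List Char) :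
    (passB l).1.foldl rstep r = l.foldl rstep r := by
  induction l using passB.induct generalizing r with
  | case1 => simp [passB]
  | case2 c => simp [passB]
  | case3 c d t hp ih =>
      simp only [passB, if_pos hp, List.foldl_cons]
      rw [ih h, rstep_cancel h hp]
  | case4 c d t hp ih =>
      simp only [passB, if_neg hp, List.foldl_cons]
      exact ih (rstep_red h c)

theorem passB_fix {l : List Char} (h : (passB l).2 = false) :
    (passB l).1 = l ∧ List.IsChain (fun a b => pairB a b = false) l := by
  induction l using passB.induct with
  | case1 => simp [passB]
  | case2 c => simp [passB]
  | case3 c d t hp ih => simp [passB, hp] at h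
  | case4 c d t hp ih =>
      simp only [passB, if_neg hp] at h ⊢
      obtain ⟨h1, h2⟩ := ih h
      exact ⟨by simp [h1],
        List.isChain_cons_cons.mpr ⟨by simpa using hp, h2⟩⟩

-- A's fold over an already-reduced word just stacks it up
theorem foldl_rstep_reduced {r : List Char} (h : RedR r) {l : List Char}
    (hl : List.IsChain (fun a b => pairB a b = false) l)
    (hc : ∀ x ∈ l.head?, ∀ e ∈ r.head?, pairB e x = false) :
    l.foldl rstep r = l.reverse ++ r := by
  induction l generalizing r with
  | nil => simp
  | cons x l' ih =>
      have hx : rstep r x = x :: r := by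
        cases r with
        | nil => simp [rstep]
        | cons e t =>
            have : pairB e x = false := hc x (by simp) e (by simp)
            simp [rstep, this]
      have hred : RedR (x :: r) :=
        List.isChain_cons.mpr ⟨fun e he => hc x (by simp) e he, h⟩
      rw [List.foldl_cons, hx,
        ih hred hl.tail
          (by
            intro y hy e he
            simp only [List.head?_cons, Option.mem_def, Option.some.injEq] at he
            subst he
            exact (List.isChain_cons.mp hl).1 y hy)]
      simp

theorem foldl_eq_loopB (l : List Char) : l.foldl rstep [] = (loopB l).reverse := by
  rw [loopB]
  split
  · next h =>
      rw [← foldl_rstep_passB (by simp [RedR]) l, foldl_eq_loopB (passB l).1]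
  · next h =>
      obtain ⟨h1, h2⟩ := passB_fix (by simpa using h)
      rw [foldl_rstep_reduced (by simp [RedR]) h2 (by simp), h1]
      simp
termination_by l.length
decreasing_by
  have := passB_len l
  rw [if_pos ‹(passB l).2 = true›] at this
  omega

-- ===== VERDICT (by name: the statement is the Claim_ definition above) =====
theorem transform_spec : Claim_equal_transform := by
  intro s _
  unfold Spec_transform transform transform_alt
  rw [foldl_stepA_eq, List.reverse_nil, foldl_eq_loopB, List.reverse_reverse]
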